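-- pv_equiv track=rewrite | github.com/sssjp123/MonNN | src/utils.py | create_monotonicity_indicator
-- ===== SOURCE A (Python) =====
-- from typing import List, Literal, Union, Dict
--
-- def create_monotonicity_indicator(
--     monotonic_indices: List[int],
--     input_size: int
-- ) -> List[int]:
--
--     indicator = [0] * input_size
--
--     for idx in monotonic_indices:
--         if 0 <= idx < input_size:
--             indicator[idx] = 1
--
--     return indicator
-- ===== SOURCE B (Python) =====
-- def create_monotonicity_indicator(monotonic_indices, input_size):
--     valid = sorted({i for i in monotonic_indices if 0 <= i < input_size})
--     out = []
--     prev = 0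
--     for i in valid:
--         out.extend([0] * (i - prev))
--         out.append(1)
--         prev = i + 1
--     out.extend([0] * (input_size - prev))
--     return out
-- ===== Notes on version B (the rewrite author's own statement) =====
-- stated objective: alternative
-- what changed: A zero-fills an array and marks positions by random-access writes while looping over the index list; B dedupes and sorts the in-range indices and then builds the output sequentially as runs of zeros separated by ones, filling the gap between consecutive sorted indices.
import Mathlib
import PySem

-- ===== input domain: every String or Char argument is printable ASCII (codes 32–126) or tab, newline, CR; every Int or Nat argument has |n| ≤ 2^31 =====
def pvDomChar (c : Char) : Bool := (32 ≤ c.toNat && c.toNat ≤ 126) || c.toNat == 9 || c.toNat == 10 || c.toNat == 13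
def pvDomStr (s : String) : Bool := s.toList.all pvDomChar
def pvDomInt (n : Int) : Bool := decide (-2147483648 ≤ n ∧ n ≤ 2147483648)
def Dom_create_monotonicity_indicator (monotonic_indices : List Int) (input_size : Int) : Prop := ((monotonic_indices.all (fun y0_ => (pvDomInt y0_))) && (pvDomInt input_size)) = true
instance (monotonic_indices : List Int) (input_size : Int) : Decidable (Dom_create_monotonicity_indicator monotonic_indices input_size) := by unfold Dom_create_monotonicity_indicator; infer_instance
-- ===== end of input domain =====

-- B replaces A's mark-into-a-zero-array loop by sorting the deduped in-range indices and
-- emitting the output as zero-runs separated by ones (gap filling); objective: alternative.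
-- ===== PORT A =====
def create_monotonicity_indicator (monotonic_indices : List Int) (input_size : Int) : List Int :=
  monotonic_indices.foldl
    (fun indicator idx =>
      if 0 ≤ idx ∧ idx < input_size then indicator.set idx.toNat 1 else indicator)
    (List.replicate input_size.toNat 0)

-- ===== PORT B =====
def create_monotonicity_indicator_alt (monotonic_indices : List Int) (input_size : Int) : List Int :=
  let valid : List Int :=
    PySem.List.sorted
      (PySem.Set.ofList (monotonic_indices.filter (fun i => decide (0 ≤ i) && decide (i < input_size))))
      (fun x => x) false
  let s : List Int × Int :=
    valid.foldl
      (fun s i => (s.1 ++ List.replicate (i - s.2).toNat 0 ++ [1], i + 1))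
      ([], 0)
  s.1 ++ List.replicate (input_size - s.2).toNat 0

-- ===== PRECONDITION & SPEC =====
def Spec_create_monotonicity_indicator (monotonic_indices : List Int) (input_size : Int) (out : List Int) : Prop := out = create_monotonicity_indicator_alt monotonic_indices input_size
instance (monotonic_indices : List Int) (input_size : Int) (out : List Int) : Decidable (Spec_create_monotonicity_indicator monotonic_indices input_size out) := by unfold Spec_create_monotonicity_indicator; infer_instance

-- ===== CLAIM (what is proved, stated in full; the proofs are below) =====
def Claim_equal_create_monotonicity_indicator : Prop := ∀ (monotonic_indices : List Int) (input_size : Int), Dom_create_monotonicity_indicator monotonic_indices input_size → Spec_create_monotonicity_indicator monotonic_indices input_size (create_monotonicity_indicator monotonic_indices input_size)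

-- ===== LEMMAS AND PROOFS =====

-- ----- A side: characterise the marking fold elementwise -----
def pvMark (n : Int) (indicator : List Int) (idx : Int) : List Int :=
  if 0 ≤ idx ∧ idx < n then indicator.set idx.toNat 1 else indicator

theorem pvMark_length (n : Int) (acc : List Int) (i : Int) :
    (pvMark n acc i).length = acc.length := by
  unfold pvMark; split_ifs <;> simp

theorem pvFold_length (n : Int) (l : List Int) (acc : List Int) :
    (l.foldl (pvMark n) acc).length = acc.length := by
  induction l generalizing acc with
  | nil => rfl
  | cons i t ih => simpa [List.foldl, pvMark_length] using ih (pvMark n acc i)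

theorem pvFold_get (n : Int) (l : List Int) (acc : List Int) (k : Nat) (hk : k < acc.length) :
    (l.foldl (pvMark n) acc)[k]? =
      if (∃ i ∈ l, 0 ≤ i ∧ i < n ∧ i = (k : Int)) then some 1 else acc[k]? := by
  induction l generalizing acc with
  | nil => simp
  | cons i t ih =>
    have hk' : k < (pvMark n acc i).length := by rwa [pvMark_length]
    rw [List.foldl_cons, ih (pvMark n acc i) hk']
    by_cases hex : ∃ j ∈ t, 0 ≤ j ∧ j < n ∧ j = (k : Int)
    · rw [if_pos hex, if_pos (by obtain ⟨j, hj, h⟩ := hex; exact ⟨j, List.mem_cons_of_mem _ hj, h⟩)]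
    · rw [if_neg hex]
      unfold pvMark
      by_cases hi : 0 ≤ i ∧ i < n
      · rw [if_pos hi]
        by_cases hik : i = (k : Int)
        · have hhead : ∃ j ∈ i :: t, 0 ≤ j ∧ j < n ∧ j = (k : Int) :=
            ⟨i, List.mem_cons_self, hi.1, hi.2, hik⟩
          rw [if_pos hhead]
          have hval : i.toNat = k := by omega
          simp [hval, hk]
        · have hnone : ¬ ∃ j ∈ i :: t, 0 ≤ j ∧ j < n ∧ j = (k : Int) := by
            rintro ⟨j, hj, h1, h2, h3⟩
            rcases List.mem_cons.1 hj with rfl | hj'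
            · exact hik h3
            · exact hex ⟨j, hj', h1, h2, h3⟩
          rw [if_neg hnone, List.getElem?_set_ne (by omega)]
      · rw [if_neg hi]
        have hnone : ¬ ∃ j ∈ i :: t, 0 ≤ j ∧ j < n ∧ j = (k : Int) := by
          rintro ⟨j, hj, h1, h2, h3⟩
          rcases List.mem_cons.1 hj with rfl | hj'
          · exact hi ⟨h1, h2⟩
          · exact hex ⟨j, hj', h1, h2, h3⟩
        rw [if_neg hnone]

-- ----- B side: the gap-filling fold in tail-recursive form -----
def pvBuild (n : Int) (prev : Int) : List Int → List Int
  | [] => List.replicate (n - prev).toNat 0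
  | i :: t => List.replicate (i - prev).toNat 0 ++ 1 :: pvBuild n (i + 1) t

theorem pvBuild_eq_foldl (n : Int) (v : List Int) (acc : List Int) (prev : Int) :
    (v.foldl (fun s i => (s.1 ++ List.replicate (i - s.2).toNat 0 ++ [1], i + 1)) (acc, prev)).1
      ++ List.replicate
          (n - (v.foldl (fun s i => (s.1 ++ List.replicate (i - s.2).toNat 0 ++ [1], i + 1)) (acc, prev)).2).toNat 0
    = acc ++ pvBuild n prev v := by
  induction v generalizing acc prev with
  | nil => simp [pvBuild]
  | cons i t ih =>
    rw [List.foldl_cons]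
    rw [ih]
    simp [pvBuild]

theorem pvBuild_get (n : Int) (v : List Int) (prev : Int)
    (hb : ∀ x ∈ v, prev ≤ x ∧ x < n) (hp : v.Pairwise (· < ·))
    (k : Nat) (hk : k < (n - prev).toNat) :
    (pvBuild n prev v)[k]? = some (if (prev + (k : Int)) ∈ v then 1 else 0) := by
  induction v generalizing prev k with
  | nil => simp [pvBuild, hk]
  | cons i t ih =>
    obtain ⟨hpi, hin⟩ := hb i List.mem_cons_self
    have ht : ∀ x ∈ t, i < x := by
      intro x hx; exact (List.pairwise_cons.1 hp).1 x hx
    unfold pvBuild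
    have hlen : (List.replicate (i - prev).toNat (0 : Int)).length = (i - prev).toNat := by simp
    by_cases h1 : k < (i - prev).toNat
    · rw [List.getElem?_append_left (by omega)]
      have hne : (prev + (k : Int)) ∉ i :: t := by
        intro hmem
        rcases List.mem_cons.1 hmem with heq | hmem'
        · omega
        · have := ht _ hmem'; omega
      simp [h1, hne]
    · rw [List.getElem?_append_right (by omega)]
      rw [hlen]
      by_cases h2 : k = (i - prev).toNat
      · have : k - (i - prev).toNat = 0 := by omega
        rw [this]
        have hmem : (prev + (k : Int)) ∈ i :: t := by
          have : prev + (k : Int) = i := by omega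
          simp [this]
        simp [hmem]
      · have h3 : 0 < k - (i - prev).toNat := by omega
        have : (1 :: pvBuild n (i + 1) t)[k - (i - prev).toNat]?
            = (pvBuild n (i + 1) t)[k - (i - prev).toNat - 1]? := by
          rcases Nat.exists_eq_succ_of_ne_zero (by omega : k - (i - prev).toNat ≠ 0) with ⟨m, hm⟩
          simp [hm]
        rw [this]
        have hb' : ∀ x ∈ t, i + 1 ≤ x ∧ x < n := by
          intro x hx; exact ⟨by have := ht x hx; omega, (hb x (List.mem_cons_of_mem _ hx)).2⟩
        have hk' : k - (i - prev).toNat - 1 < (n - (i + 1)).toNat := by omega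
        rw [ih (i + 1) hb' (List.pairwise_cons.1 hp).2 _ hk']
        have heq : i + 1 + ((k - (i - prev).toNat - 1 : Nat) : Int) = prev + (k : Int) := by
          omega
        rw [heq]
        have hmemiff : (prev + (k : Int)) ∈ i :: t ↔ (prev + (k : Int)) ∈ t := by
          constructor
          · intro h; rcases List.mem_cons.1 h with heq2 | h'
            · omega
            · exact h'
          · exact List.mem_cons_of_mem _
        by_cases hm : (prev + (k : Int)) ∈ t
        · simp [hm, hmemiff.2 hm]
        · have hne : ¬ prev + (k : Int) = i := by omega
          simp [hm, hne]

-- ===== VERDICT (by name: the statement is the Claim_ definition above) =====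
theorem create_monotonicity_indicator_spec : Claim_equal_create_monotonicity_indicator := by
  intro l n _
  unfold Spec_create_monotonicity_indicator create_monotonicity_indicator
      create_monotonicity_indicator_alt
  show l.foldl (pvMark n) (List.replicate n.toNat 0) = _
  set f := l.filter (fun i => decide (0 ≤ i) && decide (i < n)) with hf
  set v := PySem.List.sorted (PySem.Set.ofList f) (fun x => x) false with hv
  show l.foldl (pvMark n) (List.replicate n.toNat 0) =
      (v.foldl (fun s i => (s.1 ++ List.replicate (i - s.2).toNat 0 ++ [1], i + 1))
        (([] : List Int), (0 : Int))).1
      ++ List.replicate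
          (n - (v.foldl (fun s i => (s.1 ++ List.replicate (i - s.2).toNat 0 ++ [1], i + 1))
            (([] : List Int), (0 : Int))).2).toNat 0
  rw [pvBuild_eq_foldl n v [] 0, List.nil_append]
  have hmemv : ∀ x : Int, x ∈ v ↔ (x ∈ l ∧ 0 ≤ x ∧ x < n) := by
    intro x
    rw [hv, PySem.List.mem_sorted, PySem.Set.mem_ofList, hf, List.mem_filter]
    simp
  have hpv : v.Pairwise (· < ·) := by
    rw [hv]; exact PySem.List.sorted_ofList_pairwise_lt f
  have hbv : ∀ x ∈ v, (0 : Int) ≤ x ∧ x < n := fun x hx => ((hmemv x).1 hx).2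
  apply List.ext_getElem?
  intro k
  by_cases hk : k < n.toNat
  · rw [pvFold_get n l _ k (by simpa using hk)]
    rw [pvBuild_get n v 0 hbv hpv k (by omega)]
    simp only [Int.zero_add]
    by_cases hex : ∃ i ∈ l, 0 ≤ i ∧ i < n ∧ i = (k : Int)
    · rw [if_pos hex]
      have : (k : Int) ∈ v := by
        obtain ⟨j, hj, h1, h2, rfl⟩ := hex
        exact (hmemv _).2 ⟨hj, h1, h2⟩
      rw [if_pos this]
    · rw [if_neg hex, List.getElem?_replicate]
      have : (k : Int) ∉ v := by
        intro h
        obtain ⟨h1, h2, h3⟩ := (hmemv _).1 h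
        exact hex ⟨(k : Int), h1, h2, h3, rfl⟩
      rw [if_neg this, if_pos hk]
  · have h1 : (l.foldl (pvMark n) (List.replicate n.toNat 0)).length ≤ k := by
      rw [pvFold_length]; simpa using Nat.le_of_not_lt hk
    have h2 : (pvBuild n 0 v).length ≤ k := by
      have := pvBuild_eq_foldl n v [] 0
      -- compute length via getElem?: instead prove directly by length lemma below
      exact le_trans (by
        clear h1
        -- length of pvBuild
        suffices hlen : ∀ (prev : Int) (w : List Int), (∀ x ∈ w, prev ≤ x ∧ x < n) →
            w.Pairwise (· < ·) → (pvBuild n prev w).length = (n - prev).toNat by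
          rw [hlen 0 v hbv hpv]; omega
        intro prev w
        induction w generalizing prev with
        | nil => intro _ _; simp [pvBuild]
        | cons i t ih =>
          intro hb hp
          obtain ⟨hpi, hin⟩ := hb i List.mem_cons_self
          have ht : ∀ x ∈ t, i < x := fun x hx => (List.pairwise_cons.1 hp).1 x hx
          have hb' : ∀ x ∈ t, i + 1 ≤ x ∧ x < n := by
            intro x hx; exact ⟨by have := ht x hx; omega, (hb x (List.mem_cons_of_mem _ hx)).2⟩
          simp [pvBuild, ih (i+1) hb' (List.pairwise_cons.1 hp).2]
          omega) (Nat.le_of_not_lt hk)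
    rw [List.getElem?_eq_none h1, List.getElem?_eq_none h2]
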